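-- pv_equiv track=rewrite | github.com/lbotao399-stack/recover-bootstrap-result | src/susy_mp_bootstrap/figure4_cubic.py | _generate_words
-- ===== SOURCE A (Python) =====
-- from functools import lru_cache
--
-- def _generate_words(max_level: int) -> list[tuple[str, ...]]:
--     @lru_cache(maxsize=None)
--     def words_of_level(level: int) -> tuple[tuple[str, ...], ...]:
--         if level == 0:
--             return (tuple(),)
--         words: list[tuple[str, ...]] = []
--         if level >= 1:
--             for word in words_of_level(level - 1):
--                 words.append(word + ("z",))
--         if level >= 2:
--             for word in words_of_level(level - 2):
--                 words.append(word + ("q",))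
--         return tuple(words)
--
--     basis: list[tuple[str, ...]] = [tuple()]
--     for level in range(1, max_level + 1):
--         basis.extend(words_of_level(level))
--     return basis
-- ===== SOURCE B (Python) =====
-- def _generate_words(max_level: int) -> list[tuple[str, ...]]:
--     # Iterative bottom-up pass keeping only the last two levels (rolling pair),
--     # instead of memoized recursion.
--     basis: list[tuple[str, ...]] = [tuple()]
--     prev2: list[tuple[str, ...]] = []
--     prev1: list[tuple[str, ...]] = [tuple()]
--     for _ in range(max_level):
--         cur = [w + ("z",) for w in prev1] + [w + ("q",) for w in prev2]
--         basis.extend(cur)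
--         prev2, prev1 = prev1, cur
--     return basis
-- ===== Notes on version B (the rewrite author's own statement) =====
-- stated objective: simpler
-- what changed: Replaced the memoized recursive words_of_level helper (lru_cache + per-level recursion re-entered from an outer loop) with a single iterative pass that keeps only the last two levels as a rolling pair and appends each new level to the basis as it is built.
import Mathlib
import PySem

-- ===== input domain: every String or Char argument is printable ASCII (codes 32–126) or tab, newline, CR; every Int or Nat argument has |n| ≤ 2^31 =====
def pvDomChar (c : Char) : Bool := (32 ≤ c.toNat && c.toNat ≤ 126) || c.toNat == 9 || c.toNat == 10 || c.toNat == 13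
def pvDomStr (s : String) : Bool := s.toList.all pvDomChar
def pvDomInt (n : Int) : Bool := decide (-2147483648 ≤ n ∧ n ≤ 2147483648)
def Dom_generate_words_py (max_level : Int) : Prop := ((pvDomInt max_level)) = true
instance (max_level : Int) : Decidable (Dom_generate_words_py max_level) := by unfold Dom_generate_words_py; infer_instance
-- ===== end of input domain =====

-- B replaces A's memoized recursion by an iterative rolling pair of the last two levels (objective: simpler).

-- ===== PORT A =====
-- words_of_level: the memoized recursion of A (level == 0 base; z-extensions of level-1, then q-extensions of level-2)
def wordsOfLevelA : Nat → List (List String)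
  | 0 => [[]]
  | 1 => (wordsOfLevelA 0).map (fun w => w ++ ["z"])
  | (n+2) => (wordsOfLevelA (n+1)).map (fun w => w ++ ["z"])
             ++ (wordsOfLevelA n).map (fun w => w ++ ["q"])

def generate_words_py (max_level : Int) : List (List String) :=
  (PySem.List.pyRange 1 (max_level + 1) 1).foldl
    (fun basis level => basis ++ wordsOfLevelA level.toNat) [[]]

-- ===== PORT B =====
def generate_words_py_alt (max_level : Int) : List (List String) :=
  ((PySem.List.pyRange 0 max_level 1).foldl
    (fun st _ =>
      let cur := st.2.2.map (fun w => w ++ ["z"]) ++ st.2.1.map (fun w => w ++ ["q"])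
      (st.1 ++ cur, st.2.2, cur))
    ([[]], [], [[]])).1

-- ===== PRECONDITION & SPEC =====
def Spec_generate_words_py (max_level : Int) (out : List (List String)) : Prop := out = generate_words_py_alt max_level
instance (max_level : Int) (out : List (List String)) : Decidable (Spec_generate_words_py max_level out) := by unfold Spec_generate_words_py; infer_instance

-- ===== CLAIM (what is proved, stated in full; the proofs are below) =====
def Claim_equal_generate_words_py : Prop := ∀ (max_level : Int), Dom_generate_words_py max_level → Spec_generate_words_py max_level (generate_words_py max_level)

-- ===== LEMMAS AND PROOFS =====

-- A's basis after processing levels 1..n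
def basisA (n : Nat) : List (List String) :=
  (List.range n).foldl (fun acc k => acc ++ wordsOfLevelA (k + 1)) [[]]

-- B's step and state after n iterations
def bstep (st : List (List String) × List (List String) × List (List String)) :
    List (List String) × List (List String) × List (List String) :=
  let cur := st.2.2.map (fun w => w ++ ["z"]) ++ st.2.1.map (fun w => w ++ ["q"])
  (st.1 ++ cur, st.2.2, cur)

def stB (n : Nat) : List (List String) × List (List String) × List (List String) :=
  (List.range n).foldl (fun st _ => bstep st) ([[]], [], [[]])

-- prev2 component of the invariant
def prevOf : Nat → List (List String)
  | 0 => []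
  | (n+1) => wordsOfLevelA n

lemma basisA_succ (n : Nat) : basisA (n + 1) = basisA n ++ wordsOfLevelA (n + 1) := by
  simp [basisA, List.range_succ]

lemma stB_succ (n : Nat) : stB (n + 1) = bstep (stB n) := by
  simp [stB, List.range_succ]

lemma stB_eq (n : Nat) : stB n = (basisA n, prevOf n, wordsOfLevelA n) := by
  induction n with
  | zero => rfl
  | succ m ih =>
    rw [stB_succ, ih, basisA_succ]
    cases m with
    | zero => simp [bstep, prevOf, wordsOfLevelA]
    | succ k => rfl

lemma portA_eq (m : Int) : generate_words_py m = basisA m.toNat := by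
  have h1 : m + 1 - 1 = m := by ring
  unfold generate_words_py
  rw [PySem.List.pyRange_one, h1, List.foldl_map]
  unfold basisA
  congr 1
  funext acc k
  have hk : ((1 : Int) + (k : Nat)).toNat = k + 1 := by omega
  rw [hk]

lemma portB_eq (m : Int) : generate_words_py_alt m = (stB m.toNat).1 := by
  unfold generate_words_py_alt
  rw [PySem.List.pyRange_one, List.foldl_map]
  simp [stB, bstep]

-- ===== VERDICT (by name: the statement is the Claim_ definition above) =====
theorem generate_words_py_spec : Claim_equal_generate_words_py := by
  intro m _
  unfold Spec_generate_words_py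
  rw [portA_eq, portB_eq, stB_eq]
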